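-- pv_equiv track=rewrite | github.com/ShamylUCF/Codepath | Unit 2/Session 2/Question 1.py | find_balanced_subsequence
-- ===== SOURCE A (Python) =====
-- def find_balanced_subsequence(art_pieces):
--     freq = {}
--     arr = []
--     max_sum = 0
--
--     for x in art_pieces:
--         if x in freq:
--             freq[x] += 1
--         else:
--             freq[x] = 1
--
--     for key in freq.keys():
--         arr.append(key)
--     arr.sort()
--
--     for i in range(len(arr) - 1):
--         if arr[i+1] - arr[i] == 1:
--             temp = freq[arr[i]] + freq[arr[i+1]]
--             if temp > max_sum:
--                 max_sum = temp
--
--     return max_sum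
-- ===== SOURCE B (Python) =====
-- def find_balanced_subsequence(art_pieces):
--     freq = {}
--     for x in art_pieces:
--         freq[x] = freq.get(x, 0) + 1
--     best = 0
--     for k, c in freq.items():
--         c2 = freq.get(k + 1)
--         if c2 is not None:
--             s = c + c2
--             if s > best:
--                 best = s
--     return best
-- ===== Notes on version B (the rewrite author's own statement) =====
-- stated objective: faster
-- what changed: Instead of sorting the distinct values and scanning adjacent sorted entries for a gap of 1, B does a single hash-map pass: for every key k it looks up k+1 directly, removing the sort entirely.
import Mathlib
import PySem

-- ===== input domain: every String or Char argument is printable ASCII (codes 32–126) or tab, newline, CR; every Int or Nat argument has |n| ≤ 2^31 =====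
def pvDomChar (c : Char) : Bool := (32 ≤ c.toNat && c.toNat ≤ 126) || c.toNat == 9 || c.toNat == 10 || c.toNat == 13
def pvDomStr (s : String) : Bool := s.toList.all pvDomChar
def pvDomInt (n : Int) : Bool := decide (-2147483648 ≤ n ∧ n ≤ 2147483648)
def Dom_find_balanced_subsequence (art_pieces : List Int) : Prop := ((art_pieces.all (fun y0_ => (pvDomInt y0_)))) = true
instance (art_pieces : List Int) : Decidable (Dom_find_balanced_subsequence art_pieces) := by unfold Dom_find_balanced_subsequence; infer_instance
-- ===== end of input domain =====

-- B replaces A's sort-then-adjacent-scan over the distinct values by a single hash-map pass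
-- that looks up k+1 directly for every key k (objective: faster, no sort).

-- ===== PORT A =====
-- freq[arr[i]] / freq[arr[i+1]] are ported with getD 0: exact, since every arr element is a key of freq.
-- arr[i] / arr[i+1] are ported with pyGetD _ _ 0: exact, since i ranges over 0 .. len(arr)-2.
def find_balanced_subsequence (art_pieces : List Int) : Int :=
  let freq : PySem.Dict Int Int :=
    art_pieces.foldl (fun d x => if d.contains x then d.modify x 0 (· + 1) else d.insert x 1)
      PySem.Dict.empty
  let arr : List Int := freq.keys.foldl (fun acc k => acc ++ [k]) []
  let arr : List Int := PySem.List.sorted arr (fun x => x) false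
  (PySem.List.pyRange 0 ((arr.length : Int) - 1) 1).foldl
    (fun max_sum i =>
      if PySem.List.pyGetD arr (i + 1) 0 - PySem.List.pyGetD arr i 0 = 1 then
        let temp := freq.getD (PySem.List.pyGetD arr i 0) 0 + freq.getD (PySem.List.pyGetD arr (i + 1) 0) 0
        if temp > max_sum then temp else max_sum
      else max_sum)
    0

-- ===== PORT B =====
def find_balanced_subsequence_alt (art_pieces : List Int) : Int :=
  let freq : PySem.Dict Int Int :=
    art_pieces.foldl (fun d x => d.insert x (d.getD x 0 + 1)) PySem.Dict.empty
  freq.items.foldl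
    (fun best kc =>
      match freq.get? (kc.1 + 1) with
      | some c2 => let s := kc.2 + c2; if s > best then s else best
      | none => best)
    0

-- ===== PRECONDITION & SPEC =====
def Spec_find_balanced_subsequence (art_pieces : List Int) (out : Int) : Prop := out = find_balanced_subsequence_alt art_pieces
instance (art_pieces : List Int) (out : Int) : Decidable (Spec_find_balanced_subsequence art_pieces out) := by unfold Spec_find_balanced_subsequence; infer_instance

-- ===== CLAIM (what is proved, stated in full; the proofs are below) =====
def Claim_equal_find_balanced_subsequence : Prop := ∀ (art_pieces : List Int), Dom_find_balanced_subsequence art_pieces → Spec_find_balanced_subsequence art_pieces (find_balanced_subsequence art_pieces)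

-- ===== LEMMAS AND PROOFS =====

lemma freqA_eq_counter (xs : List Int) :
    xs.foldl (fun d x => if d.contains x then d.modify x 0 (· + 1) else d.insert x 1)
      PySem.Dict.empty = PySem.Dict.counter xs := by
  rw [PySem.Dict.counter_eq_foldl]
  apply PySem.List.foldl_congr_mem
  intro d x _
  by_cases h : d.contains x = true
  · simp [h]
  · simp only [Bool.not_eq_true] at h
    simp [h, PySem.Dict.modify, PySem.Dict.getD_of_not_contains d 0 h]

lemma get?_counter_eq (xs : List Int) (v : Int) :
    (PySem.Dict.counter xs).get? v = if v ∈ xs then some ((xs.count v : Int)) else none := by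
  have hc := PySem.Dict.contains_counter xs v
  rw [PySem.Dict.contains_eq_isSome_get?] at hc
  by_cases hm : v ∈ xs
  · have : xs.contains v = true := by simpa using hm
    rw [this] at hc
    rcases ho : (PySem.Dict.counter xs).get? v with _ | w
    · rw [ho] at hc; simp at hc
    · have := PySem.Dict.getD_counter xs v
      rw [PySem.Dict.getD_eq_get?_getD, ho] at this
      simp at this
      simp [hm, this]
  · have : xs.contains v = false := by simpa using hm
    rw [this] at hc
    rcases ho : (PySem.Dict.counter xs).get? v with _ | w
    · simp [hm]
    · rw [ho] at hc; simp at hc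

lemma foldl_body_max {α : Type} (f : Int → α → Int) (c : α → Int) :
    ∀ (l : List α) (m : Int), 0 ≤ m →
      (∀ x ∈ l, ∀ m' : Int, 0 ≤ m' → f m' x = max m' (c x)) →
      l.foldl f m = (l.map c).foldl max m := by
  intro l
  induction l with
  | nil => intro m _ _; rfl
  | cons a t ih =>
    intro m hm hf
    simp only [List.foldl_cons, List.map_cons]
    rw [hf a (by simp) m hm]
    exact ih _ (le_trans hm (le_max_left _ _)) (fun x hx => hf x (by simp [hx]))

lemma foldl_max_pos_filter :
    ∀ (l : List Int) (m : Int), 0 ≤ m →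
      l.foldl max m = (l.filter (fun v => decide (0 < v))).foldl max m := by
  intro l
  induction l with
  | nil => intro m _; rfl
  | cons a t ih =>
    intro m hm
    by_cases h : 0 < a
    · simp only [List.filter_cons, h, decide_true, List.foldl_cons]
      exact ih _ (le_trans hm (le_max_left _ _))
    · simp only [List.filter_cons, h, decide_false, List.foldl_cons]
      rw [max_eq_left (le_trans (le_of_not_gt h) hm)]
      exact ih _ hm

lemma foldl_max_perm {l₁ l₂ : List Int} (h : l₁.Perm l₂) (m : Int) :
    l₁.foldl max m = l₂.foldl max m := by
  haveI : RightCommutative (max : Int → Int → Int) := ⟨fun b a₁ a₂ => by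
    simp only [max_def]; split_ifs <;> omega⟩
  exact h.foldl_eq m

lemma map_filter_pos {α : Type} (c g : α → Int) (p : α → Bool) :
    ∀ l : List α, (∀ x ∈ l, c x = if p x then g x else 0) → (∀ x ∈ l, p x = true → 0 < g x) →
      (l.map c).filter (fun v => decide (0 < v)) = (l.filter p).map g := by
  intro l
  induction l with
  | nil => intro _ _; rfl
  | cons a t ih =>
    intro hc hg
    simp only [List.map_cons, List.filter_cons]
    rw [hc a (by simp)]
    by_cases hp : p a = true
    · simp only [hp, if_true, decide_eq_true_eq]
      rw [if_pos (hg a (by simp) hp)]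
      simp only [List.map_cons]
      rw [ih (fun x hx => hc x (by simp [hx])) (fun x hx => hg x (by simp [hx]))]
    · simp only [Bool.not_eq_true] at hp
      simp only [hp, Bool.false_eq_true, if_false, decide_eq_true_eq]
      rw [if_neg (by omega)]
      exact ih (fun x hx => hc x (by simp [hx])) (fun x hx => hg x (by simp [hx]))

lemma foldl_range_pairs (g : Int → Int → Int → Int) :
    ∀ (s : List Int) (m : Int),
      (List.range (s.length - 1)).foldl (fun m i => g m (s.getD i 0) (s.getD (i + 1) 0)) m
        = (s.zip s.tail).foldl (fun m p => g m p.1 p.2) m := by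
  intro s
  induction s with
  | nil => intro m; rfl
  | cons a t ih =>
    cases t with
    | nil => intro m; rfl
    | cons b t' =>
      intro m
      have hlen : (a :: b :: t').length - 1 = (b :: t').length - 1 + 1 := by
        simp [List.length_cons]
      rw [hlen, List.range_succ_eq_map, List.foldl_cons, List.foldl_map]
      simp only [List.getD_cons_zero, List.getD_cons_succ]
      have hbr : (List.range ((b :: t').length - 1)).foldl
            (fun x y => g x ((b :: t').getD y 0) (t'.getD y 0)) (g m a b)
          = (List.range ((b :: t').length - 1)).foldl
            (fun m i => g m ((b :: t').getD i 0) ((b :: t').getD (i + 1) 0)) (g m a b) := by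
        apply PySem.List.foldl_congr_mem
        intro acc x _
        simp
      rw [hbr, ih]
      simp [List.zip_cons_cons, List.foldl_cons]

lemma zip_filter_diff_one :
    ∀ s : List Int, s.Pairwise (· < ·) →
      (s.zip s.tail).filter (fun p => decide (p.2 - p.1 = 1))
        = (s.filter (fun k => decide ((k + 1) ∈ s))).map (fun k => (k, k + 1)) := by
  intro s
  induction s with
  | nil => intro _; rfl
  | cons a t ih =>
    cases t with
    | nil =>
      intro _
      simp
    | cons b t' =>
      intro hp
      rcases List.pairwise_cons.mp hp with ⟨ha, hp'⟩
      have hab : a < b := ha b (by simp)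
      have hbt : ∀ y ∈ t', b < y := fun y hy => (List.pairwise_cons.mp hp').1 y hy
      have hhead : (decide ((a + 1) ∈ a :: b :: t') : Bool) = decide (b - a = 1) := by
        rw [decide_eq_decide]
        constructor
        · intro h
          rcases List.mem_cons.mp h with h1 | h2
          · omega
          · rcases List.mem_cons.mp h2 with h3 | h4
            · omega
            · have := hbt _ h4; omega
        · intro h; simp; omega
      have htail : (b :: t').filter (fun k => decide ((k + 1) ∈ a :: b :: t'))
          = (b :: t').filter (fun k => decide ((k + 1) ∈ b :: t')) := by
        apply List.filter_congr
        intro k hk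
        rw [decide_eq_decide]
        constructor
        · intro h
          rcases List.mem_cons.mp h with h1 | h2
          · exfalso
            rcases List.mem_cons.mp hk with hk1 | hk2
            · omega
            · have := hbt _ hk2; omega
          · exact h2
        · intro h; exact List.mem_cons_of_mem _ h
      have hR : (a :: b :: t').filter (fun k => decide ((k + 1) ∈ a :: b :: t'))
          = (if b - a = 1 then [a] else []) ++ (b :: t').filter (fun k => decide ((k + 1) ∈ b :: t')) := by
        rw [List.filter_cons, hhead, htail]
        by_cases hd : b - a = 1 <;> simp [hd]
      have ihe := ih hp'
      simp only [List.tail_cons] at ihe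
      rw [hR]
      rw [List.tail_cons, List.zip_cons_cons, List.filter_cons, ihe]
      by_cases hd : b - a = 1
      · simp only [hd, decide_true, if_true, List.map_append, List.map_cons, List.map_nil]
        have : a + 1 = b := by omega
        simp [this]
      · simp only [hd, decide_false, if_false, List.nil_append]
        simp


lemma A_eq_B (xs : List Int) : find_balanced_subsequence xs = find_balanced_subsequence_alt xs := by
  have hcnt : ∀ k : Int, k ∈ xs → (0 : Int) < (xs.count k : Int) := by
    intro k hk
    exact_mod_cast List.count_pos_iff.mpr hk
  simp only [find_balanced_subsequence, find_balanced_subsequence_alt]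
  rw [freqA_eq_counter, PySem.Dict.foldl_insert_getD_add_one_eq_counter,
      PySem.List.foldl_append_singleton, List.nil_append, PySem.Dict.keys_counter]
  set S := PySem.Set.ofList xs with hS
  set s := PySem.List.sorted S (fun x => x) false with hs
  have hperm : s.Perm S := PySem.List.sorted_perm S _ false
  have hsorted : s.Pairwise (· < ·) := PySem.List.sorted_ofList_pairwise_lt xs
  have hmem_s : ∀ k : Int, k ∈ s ↔ k ∈ xs := by
    intro k; rw [hperm.mem_iff]; exact PySem.Set.mem_ofList xs k
  have hmem_S : ∀ k : Int, k ∈ S ↔ k ∈ xs := fun k => PySem.Set.mem_ofList xs k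
  -- abbreviations
  set cnt : Int → Int := fun k => (xs.count k : Int) with hcntd
  set g : Int → Int := fun k => cnt k + cnt (k + 1) with hg
  set q : Int → Bool := fun k => decide ((k + 1) ∈ xs) with hq
  -- ===== B side =====
  have hB : (PySem.Dict.counter xs).items.foldl
      (fun best kc =>
        match (PySem.Dict.counter xs).get? (kc.1 + 1) with
        | some c2 => let s := kc.2 + c2; if s > best then s else best
        | none => best) 0
      = ((S.filter q).map g).foldl max 0 := by
    rw [PySem.Dict.items_counter, List.foldl_map]
    rw [foldl_body_max _ (fun k => if q k then g k else 0) S 0 (le_refl 0) ?hbody]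
    case hbody =>
      intro k hk m hm
      rw [get?_counter_eq]
      by_cases h : (k + 1) ∈ xs
      · simp only [h, if_true]
        have : q k = true := by simp [hq, h]
        simp only [this, if_true]
        simp only [hg, hcntd]
        by_cases h1 : (↑(xs.count k) + ↑(xs.count (k+1)) : Int) ≤ m
        · rw [if_neg (by omega), max_eq_left h1]
        · rw [if_pos (by omega), max_eq_right (by omega)]
      · simp only [h, if_false]
        have : q k = false := by simp [hq, h]
        simp only [this, Bool.false_eq_true, if_false]
        rw [max_eq_left hm]
    rw [foldl_max_pos_filter _ 0 (le_refl 0)]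
    rw [map_filter_pos _ g q S (fun x _ => rfl) ?hpos]
    case hpos =>
      intro k hk hqk
      have hk1 : (k + 1) ∈ xs := by simpa [hq] using hqk
      have hk0 : k ∈ xs := (hmem_S k).mp hk
      have := hcnt _ hk0; have := hcnt _ hk1
      simp only [hg, hcntd]; omega
  rw [hB]
  -- ===== A side =====
  simp only [PySem.Dict.getD_counter]
  cases hn : s.length with
  | zero =>
    have hsnil : s = [] := List.length_eq_zero_iff.mp hn
    have hSnil : S = [] := (hperm.symm.trans (by rw [hsnil])).eq_nil
    rw [hSnil]
    norm_num
  | succ n =>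
    have hcast : ((n + 1 : Nat) : Int) - 1 = (n : Int) := by push_cast; ring
    rw [hcast, PySem.List.pyRange_zero_natCast, List.foldl_map]
    have hbodyconv : ∀ (m' : Int),
        (List.range n).foldl (fun (max_sum : Int) (k : Nat) =>
          if PySem.List.pyGetD s ((k : Int) + 1) 0 - PySem.List.pyGetD s ((k : Int)) 0 = 1 then
            if (List.count (PySem.List.pyGetD s ((k : Int)) 0) xs : Int) + (List.count (PySem.List.pyGetD s ((k : Int) + 1) 0) xs : Int) > max_sum then
              (List.count (PySem.List.pyGetD s ((k : Int)) 0) xs : Int) + (List.count (PySem.List.pyGetD s ((k : Int) + 1) 0) xs : Int)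
            else max_sum
          else max_sum) m'
        = (List.range (s.length - 1)).foldl (fun m i =>
            (fun m a b => if b - a = 1 then (if (List.count a xs : Int) + (List.count b xs : Int) > m then (List.count a xs : Int) + (List.count b xs : Int) else m) else m)
              m (s.getD i 0) (s.getD (i + 1) 0)) m' := by
      intro m'
      rw [show n = s.length - 1 from by omega]
      apply PySem.List.foldl_congr_mem
      intro acc k _
      have h1 : ((k : Int) + 1) = ((k + 1 : Nat) : Int) := by push_cast; ring
      rw [h1, PySem.List.pyGetD_natCast, PySem.List.pyGetD_natCast]
    rw [hbodyconv, foldl_range_pairs (fun m a b =>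
      if b - a = 1 then
        if (List.count a xs : Int) + (List.count b xs : Int) > m then (List.count a xs : Int) + (List.count b xs : Int) else m
      else m) s 0]
    rw [foldl_body_max _ (fun p : Int × Int => if p.2 - p.1 = 1 then (List.count p.1 xs : Int) + (List.count p.2 xs : Int) else 0) (s.zip s.tail) 0 (le_refl 0) ?habody]
    case habody =>
      intro p hp m hm
      by_cases hd : p.2 - p.1 = 1
      · simp only [hd, if_true]
        by_cases h1 : (List.count p.1 xs : Int) + (List.count p.2 xs : Int) ≤ m
        · rw [if_neg (by omega), max_eq_left h1]
        · rw [if_pos (by omega), max_eq_right (by omega)]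
      · simp only [hd, if_false]
        rw [max_eq_left hm]
    rw [foldl_max_pos_filter _ 0 (le_refl 0)]
    rw [map_filter_pos _ (fun p : Int × Int => (List.count p.1 xs : Int) + (List.count p.2 xs : Int)) (fun p : Int × Int => decide (p.2 - p.1 = 1)) (s.zip s.tail) ?hc ?hpos2]
    case hc =>
      intro p _
      by_cases h : p.2 - p.1 = 1 <;> simp [h]
    case hpos2 =>
      intro p hp hdp
      rcases List.of_mem_zip hp with ⟨h1, h2⟩
      have h2' : p.2 ∈ s := List.mem_of_mem_tail h2
      have := hcnt _ ((hmem_s _).mp h1)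
      have := hcnt _ ((hmem_s _).mp h2')
      show (0:Int) < (List.count p.1 xs : Int) + (List.count p.2 xs : Int)
      omega
    rw [zip_filter_diff_one s hsorted, List.map_map]
    have hcomp : ((fun p : Int × Int => (List.count p.1 xs : Int) + (List.count p.2 xs : Int)) ∘ fun k => (k, k + 1)) = g := by
      funext k
      simp [hg, hcntd]
    rw [hcomp]
    have hfiltereq : s.filter (fun k => decide ((k + 1) ∈ s)) = s.filter q := by
      apply List.filter_congr
      intro k hk
      rw [hq]
      rw [decide_eq_decide]
      exact hmem_s (k + 1)
    rw [hfiltereq]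
    exact foldl_max_perm (List.Perm.map g (hperm.filter q)) 0

-- ===== VERDICT (by name: the statement is the Claim_ definition above) =====
theorem find_balanced_subsequence_spec : Claim_equal_find_balanced_subsequence := by
  intro xs _
  unfold Spec_find_balanced_subsequence
  exact A_eq_B xs
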